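-- pv_equiv track=rewrite | github.com/dutc/tictacgame | connect3.py | find_winner_in_sequence
-- ===== SOURCE A (Python) =====
-- def find_winner_in_sequence(seq):
--     current_run = None
--     length = 0
--     for s in seq:
--         if not s:
--             length = 0
--             current_run = None
--         else:
--             if current_run == s:
--                 length += 1
--             else: # Starting a new run with a different player
--                 current_run = s
--                 length = 1
--
--             if length >= 3:
--                 return current_run # The winner, because they have more than 3 in a row!
--     return None
-- ===== SOURCE B (Python) =====
-- def find_winner_in_sequence(seq):
--     for a, b, c in zip(seq, seq[1:], seq[2:]):
--         if a and a == b == c: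
--             return a
--     return None
-- ===== Notes on version B (the rewrite author's own statement) =====
-- stated objective: simpler
-- what changed: Replaces A's run-length state machine (current_run/length accumulators with reset logic) by a stateless sliding window over all triples of consecutive elements via zip, returning the first truthy element that heads an all-equal triple.
import Mathlib
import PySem

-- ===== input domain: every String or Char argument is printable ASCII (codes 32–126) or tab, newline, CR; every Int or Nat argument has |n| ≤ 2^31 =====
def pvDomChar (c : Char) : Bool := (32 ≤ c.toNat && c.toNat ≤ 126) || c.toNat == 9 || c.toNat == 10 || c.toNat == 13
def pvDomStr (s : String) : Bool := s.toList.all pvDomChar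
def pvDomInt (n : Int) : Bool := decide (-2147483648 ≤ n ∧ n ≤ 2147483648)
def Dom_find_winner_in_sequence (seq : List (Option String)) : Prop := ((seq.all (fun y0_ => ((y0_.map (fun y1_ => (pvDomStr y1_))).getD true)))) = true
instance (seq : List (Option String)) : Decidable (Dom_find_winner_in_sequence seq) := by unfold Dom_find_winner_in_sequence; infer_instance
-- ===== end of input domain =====

-- B replaces A's run-length state machine by a stateless sliding window over all
-- triples of consecutive elements (zip of seq with its two shifts); simpler, same O(n) cost.

-- ===== PORT A =====
-- Python truthiness of an Optional[str]: falsy iff None or "".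
def pvTruthy : Option String → Bool
  | none => false
  | some t => !(t == "")

-- the for-loop of A, state = (current_run, length)
def pvLoopA : List (Option String) → Option String → Nat → Option String
  | [], _, _ => none
  | s :: rest, cur, len =>
    if pvTruthy s = false then
      pvLoopA rest none 0
    else
      let p := if cur = s then (cur, len + 1) else (s, 1)
      if p.2 ≥ 3 then p.1 else pvLoopA rest p.1 p.2

def find_winner_in_sequence (seq : List (Option String)) : Option String :=
  pvLoopA seq none 0

-- ===== PORT B =====
-- for a, b, c in zip(seq, seq[1:], seq[2:]): the windows are exactly the suffixes
-- with at least three elements, consumed left to right.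
def find_winner_in_sequence_alt : List (Option String) → Option String
  | a :: b :: c :: rest =>
    if pvTruthy a ∧ a = b ∧ b = c then a
    else find_winner_in_sequence_alt (b :: c :: rest)
  | _ => none
termination_by seq => seq.length
decreasing_by simp

-- ===== PRECONDITION & SPEC =====
def Spec_find_winner_in_sequence (seq : List (Option String)) (out : Option String) : Prop := out = find_winner_in_sequence_alt seq
instance (seq : List (Option String)) (out : Option String) : Decidable (Spec_find_winner_in_sequence seq out) := by unfold Spec_find_winner_in_sequence; infer_instance

-- ===== CLAIM (what is proved, stated in full; the proofs are below) =====
def Claim_equal_find_winner_in_sequence : Prop := ∀ (seq : List (Option String)), Dom_find_winner_in_sequence seq → Spec_find_winner_in_sequence seq (find_winner_in_sequence seq)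

-- ===== LEMMAS AND PROOFS =====

-- a truthy value differs from a falsy one
theorem pvTruthy_ne {x y : Option String} (hx : pvTruthy x = true) (hy : pvTruthy y = false) : x ≠ y := by
  intro h; rw [h, hy] at hx; exact Bool.noConfusion hx

-- a truthy value is not none
theorem pvTruthy_ne_none {x : Option String} (hx : pvTruthy x = true) : (none : Option String) ≠ x := by
  intro h; rw [← h] at hx; simp [pvTruthy] at hx

-- a failing head window is skipped by B
theorem W_fail (a b c : Option String) (r : List (Option String))
    (h : ¬ (pvTruthy a = true ∧ a = b ∧ b = c)) :
    find_winner_in_sequence_alt (a :: b :: c :: r) = find_winner_in_sequence_alt (b :: c :: r) := by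
  rw [find_winner_in_sequence_alt]
  exact if_neg h

-- dropping a falsy head never changes B's answer
theorem W_head_falsy (x : Option String) (hx : pvTruthy x = false) (xs : List (Option String)) :
    find_winner_in_sequence_alt (x :: xs) = find_winner_in_sequence_alt xs := by
  match xs with
  | [] => simp [find_winner_in_sequence_alt]
  | [y] => simp [find_winner_in_sequence_alt]
  | y :: z :: r => exact W_fail x y z r (by simp [hx])

-- dropping a head that differs from its successor never changes B's answer
theorem W_head_ne (x y : Option String) (h : x ≠ y) (xs : List (Option String)) :
    find_winner_in_sequence_alt (x :: y :: xs) = find_winner_in_sequence_alt (y :: xs) := by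
  match xs with
  | [] => simp [find_winner_in_sequence_alt]
  | z :: r => exact W_fail x y z r (by simp [h])

-- A's loop, from each of its three reachable states, equals B's window scan
theorem pvMain : ∀ (n : Nat) (xs : List (Option String)), xs.length ≤ n →
    (pvLoopA xs none 0 = find_winner_in_sequence_alt xs) ∧
    (∀ x, pvTruthy x = true → pvLoopA xs x 1 = find_winner_in_sequence_alt (x :: xs)) ∧
    (∀ x, pvTruthy x = true → pvLoopA xs x 2 = find_winner_in_sequence_alt (x :: x :: xs)) := by
  intro n
  induction n with
  | zero =>
    intro xs h
    have : xs = [] := List.eq_nil_of_length_eq_zero (Nat.le_zero.mp h)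
    subst this
    exact ⟨by simp [pvLoopA, find_winner_in_sequence_alt], fun x _ => by simp [pvLoopA, find_winner_in_sequence_alt], fun x _ => by simp [pvLoopA, find_winner_in_sequence_alt]⟩
  | succ n ih =>
    intro xs h
    cases xs with
    | nil => exact ⟨by simp [pvLoopA, find_winner_in_sequence_alt], fun x _ => by simp [pvLoopA, find_winner_in_sequence_alt], fun x _ => by simp [pvLoopA, find_winner_in_sequence_alt]⟩
    | cons y t =>
      have ht : t.length ≤ n := Nat.lt_succ_iff.mp (by simpa using h)
      obtain ⟨ih1, ih2, ih3⟩ := ih t ht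
      cases hy : pvTruthy y with
      | false =>
        have hstep : ∀ cur len, pvLoopA (y :: t) cur len = pvLoopA t none 0 := by
          intro cur len; simp [pvLoopA, hy]
        refine ⟨?_, ?_, ?_⟩
        · rw [hstep, ih1, W_head_falsy y hy]
        · intro x hx
          rw [hstep, ih1, W_head_ne x y (pvTruthy_ne hx hy), W_head_falsy y hy]
        · intro x hx
          rw [hstep, ih1, W_fail x x y t (by simp [pvTruthy_ne hx hy]),
              W_head_ne x y (pvTruthy_ne hx hy), W_head_falsy y hy]
      | true =>
        refine ⟨?_, ?_, ?_⟩
        · have : pvLoopA (y :: t) none 0 = pvLoopA t y 1 := by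
            simp [pvLoopA, hy, pvTruthy_ne_none hy]
          rw [this, ih2 y hy]
        · intro x hx
          by_cases hxy : x = y
          · subst hxy
            have : pvLoopA (x :: t) x 1 = pvLoopA t x 2 := by
              simp [pvLoopA, hy]
            rw [this, ih3 x hx]
          · have : pvLoopA (y :: t) x 1 = pvLoopA t y 1 := by
              simp [pvLoopA, hy, hxy]
            rw [this, ih2 y hy, W_head_ne x y hxy]
        · intro x hx
          by_cases hxy : x = y
          · subst hxy
            have : pvLoopA (x :: t) x 2 = x := by
              simp [pvLoopA, hy]
            rw [this, find_winner_in_sequence_alt]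
            rw [if_pos ⟨hx, rfl, rfl⟩]
          · have : pvLoopA (y :: t) x 2 = pvLoopA t y 1 := by
              simp [pvLoopA, hy, hxy]
            rw [this, ih2 y hy, W_fail x x y t (by simp [hxy]), W_head_ne x y hxy]

-- ===== VERDICT (by name: the statement is the Claim_ definition above) =====
theorem find_winner_in_sequence_spec : Claim_equal_find_winner_in_sequence := by
  intro seq _
  unfold Spec_find_winner_in_sequence find_winner_in_sequence
  exact (pvMain seq.length seq le_rfl).1
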